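-- pv_equiv track=rewrite | github.com/DmitryBogomolov/dicecalc | test.py | get_roll_from_idx
-- ===== SOURCE A (Python) =====
-- from typing import Final, List, Dict
--
-- DiceRoll = List[int]
--
-- DICE_COUNT: Final[int] = 3
--
-- DICE_SIDES: Final[int] = 6
--
-- total_count = DICE_SIDES ** DICE_COUNT
--
-- def init_roll() -> DiceRoll:
--     return [1 for _ in range(DICE_COUNT)]
--
-- def get_roll_from_idx(idx: int) -> DiceRoll:
--     roll = init_roll()
--     residue = idx
--     factor = total_count
--     for i in range(DICE_COUNT):
--         factor //= DICE_SIDES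
--         k, residue = divmod(residue, factor)
--         roll[i] = k + 1
--     return roll
-- ===== SOURCE B (Python) =====
-- DICE_COUNT = 3
-- DICE_SIDES = 6
--
-- def get_roll_from_idx(idx: int):
--     # Build digits least-significant-first with repeated divmod, then reverse;
--     # the leftover quotient is the (unbounded) top digit, exactly as in A.
--     digits = []
--     q = idx
--     for _ in range(DICE_COUNT - 1):
--         q, r = divmod(q, DICE_SIDES)
--         digits.append(r + 1)
--     return [q + 1] + digits[::-1]
-- ===== Notes on version B (the rewrite author's own statement) =====
-- stated objective: alternative
-- what changed: Replaces A's top-down division by precomputed descending factors (216//6 -> 36,6,1) writing into a preallocated list with a bottom-up repeated-divmod pass that collects remainders least-significant-first and reverses them, keeping the final quotient as the unbounded top digit.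
import Mathlib
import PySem

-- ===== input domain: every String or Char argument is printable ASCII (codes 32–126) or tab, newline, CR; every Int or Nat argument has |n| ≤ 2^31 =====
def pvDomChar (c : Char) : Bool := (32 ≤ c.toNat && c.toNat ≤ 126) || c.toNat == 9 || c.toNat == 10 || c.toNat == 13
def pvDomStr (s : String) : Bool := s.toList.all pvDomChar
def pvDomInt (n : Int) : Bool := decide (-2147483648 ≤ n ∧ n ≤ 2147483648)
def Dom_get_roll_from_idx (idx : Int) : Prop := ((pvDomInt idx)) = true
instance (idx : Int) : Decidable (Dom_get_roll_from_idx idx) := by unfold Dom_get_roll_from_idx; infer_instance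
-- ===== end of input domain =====

-- B replaces A's descending-precomputed-factor top-down division with a bottom-up
-- repeated-divmod pass collecting remainders and reversing them (alternative decomposition).


-- ===== PORT A =====
def pyDICE_COUNT : Int := 3
def pyDICE_SIDES : Int := 6
def py_total_count : Int := pyDICE_SIDES ^ pyDICE_COUNT.toNat

def init_roll : List Int := (PySem.List.pyRange 0 pyDICE_COUNT 1).map (fun _ => (1 : Int))

def get_roll_from_idx (idx : Int) : List Int :=
  let roll := init_roll
  let residue := idx
  let factor := py_total_count
  let s := (PySem.List.pyRange 0 pyDICE_COUNT 1).foldl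
    (fun (st : List Int × Int × Int) i =>
      let (roll, residue, factor) := st
      let factor := PySem.Int.floordiv factor pyDICE_SIDES
      let k := PySem.Int.floordiv residue factor
      let residue := PySem.Int.mod residue factor
      (roll.set i.toNat (k + 1), residue, factor))
    (roll, residue, factor)
  s.1

-- ===== PORT B =====
def get_roll_from_idx_alt (idx : Int) : List Int :=
  let s := (PySem.List.pyRange 0 (pyDICE_COUNT - 1) 1).foldl
    (fun (st : Int × List Int) _ =>
      let (q, digits) := st
      let q' := PySem.Int.floordiv q pyDICE_SIDES
      let r := PySem.Int.mod q pyDICE_SIDES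
      (q', digits ++ [r + 1]))
    (idx, [])
  (s.1 + 1) :: s.2.reverse

-- ===== PRECONDITION & SPEC =====
def Spec_get_roll_from_idx (idx : Int) (out : List Int) : Prop := out = get_roll_from_idx_alt idx
instance (idx : Int) (out : List Int) : Decidable (Spec_get_roll_from_idx idx out) := by unfold Spec_get_roll_from_idx; infer_instance

-- ===== CLAIM (what is proved, stated in full; the proofs are below) =====
def Claim_equal_get_roll_from_idx : Prop := ∀ (idx : Int), Dom_get_roll_from_idx idx → Spec_get_roll_from_idx idx (get_roll_from_idx idx)

-- ===== LEMMAS AND PROOFS =====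

-- ===== VERDICT (by name: the statement is the Claim_ definition above) =====
theorem get_roll_from_idx_spec : Claim_equal_get_roll_from_idx := by
  intro idx _
  unfold Spec_get_roll_from_idx get_roll_from_idx get_roll_from_idx_alt init_roll
  rw [show PySem.List.pyRange 0 pyDICE_COUNT 1 = [0, 1, 2] from by decide,
      show PySem.List.pyRange 0 (pyDICE_COUNT - 1) 1 = [0, 1] from by decide]
  norm_num [pyDICE_SIDES, py_total_count, pyDICE_COUNT, List.foldl, List.set]
  norm_num [show Int.toNat 3 = 3 from rfl, show Int.toNat 2 = 2 from rfl,
    show Int.toNat 1 = 1 from rfl, show Int.toNat 0 = 0 from rfl, List.set]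
  constructor <;> omega
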